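-- pv_equiv track=rewrite | github.com/limnyn/python_codingtest | 잡다/test.py | solution
-- ===== SOURCE A (Python) =====
-- def compare_lists(A, B):
--     for i in range(len(A)):
--         if A[i] == 1 and B[i] == 0:
--             return False
--     return True
--
-- def solution(Parameter):
--     result = [[], [], [], []]
--     times = [
--         [1, 1, 1, 1, 1, 1, 0], # 0
--         [0, 1, 1, 0, 0, 0, 0], # 1
--         [1, 1, 0, 1, 1, 0, 1], # 2
--         [1, 1, 1, 1, 0, 0, 1], # 3
--         [0, 1, 1, 0, 0, 1, 1], # 4
--         [1, 0, 1, 1, 0, 1, 1], # 5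
--         [1, 0, 1, 1, 1, 1, 1], # 6
--         [1, 1, 1, 0, 0, 0, 0], # 7
--         [1, 1, 1, 1, 1, 1, 1], # 8
--         [1, 1, 1, 1, 0, 1, 1], # 9
--     ]
--     for index, para in enumerate(Parameter):
--         for i in range(len(times)):
--             if compare_lists(para, times[i]):
--                 result[index].append(i)
--
--     answer = []
--     for i in result[0]:
--         for j in result[1]:
--             for k in result[2]:
--                 for l in result[3]:
--                     hour = i * 10 + j
--                     minute = k * 10 + l
--                     if hour <= 23 and minute <= 59:
--                         answer.append([i, j, k, l])
--     return sorted(answer)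
-- ===== SOURCE B (Python) =====
-- PATTERNS = [
--     [1, 1, 1, 1, 1, 1, 0],  # 0
--     [0, 1, 1, 0, 0, 0, 0],  # 1
--     [1, 1, 0, 1, 1, 0, 1],  # 2
--     [1, 1, 1, 1, 0, 0, 1],  # 3
--     [0, 1, 1, 0, 0, 1, 1],  # 4
--     [1, 0, 1, 1, 0, 1, 1],  # 5
--     [1, 0, 1, 1, 1, 1, 1],  # 6
--     [1, 1, 1, 0, 0, 0, 0],  # 7
--     [1, 1, 1, 1, 1, 1, 1],  # 8
--     [1, 1, 1, 1, 0, 1, 1],  # 9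
-- ]
--
-- def fits(para, digit):
--     # every lit segment required by para is lit in the digit's pattern
--     return all(p != 1 or s == 1 for p, s in zip(para, PATTERNS[digit]))
--
-- def solution(Parameter):
--     if len(Parameter) < 4:
--         return []
--     answer = []
--     for hour in range(24):
--         for minute in range(60):
--             digits = [hour // 10, hour % 10, minute // 10, minute % 10]
--             if all(fits(Parameter[pos], digits[pos]) for pos in range(4)):
--                 answer.append(digits)
--     return answer
-- ===== Notes on version B (the rewrite author's own statement) =====
-- stated objective: simpler
-- what changed: Instead of building four per-position candidate digit lists and taking their filtered Cartesian product followed by a sort, B enumerates the 24*60 valid clock times directly, decomposes each into its four digits and keeps those whose digits all fit the segment constraints; the enumeration is already in sorted order so no sort is needed.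
import Mathlib
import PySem

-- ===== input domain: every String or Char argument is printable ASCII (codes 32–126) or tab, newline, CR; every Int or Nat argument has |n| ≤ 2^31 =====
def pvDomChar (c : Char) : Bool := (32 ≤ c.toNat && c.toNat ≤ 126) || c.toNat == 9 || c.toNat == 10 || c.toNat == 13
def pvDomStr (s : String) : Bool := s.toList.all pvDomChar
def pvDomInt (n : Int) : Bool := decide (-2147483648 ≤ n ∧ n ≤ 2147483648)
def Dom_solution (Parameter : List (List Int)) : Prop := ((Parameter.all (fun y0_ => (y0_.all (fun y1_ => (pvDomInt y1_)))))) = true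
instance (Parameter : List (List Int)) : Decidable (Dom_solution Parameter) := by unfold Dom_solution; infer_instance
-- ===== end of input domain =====

-- B replaces A's candidate-list Cartesian product + sort by a direct already-sorted scan of the
-- 24*60 clock times, testing the four digits of each time against the segment constraints (simpler).

-- ===== PORT A =====
def timesA : List (List Int) :=
  [[1, 1, 1, 1, 1, 1, 0], [0, 1, 1, 0, 0, 0, 0], [1, 1, 0, 1, 1, 0, 1],
   [1, 1, 1, 1, 0, 0, 1], [0, 1, 1, 0, 0, 1, 1], [1, 0, 1, 1, 0, 1, 1],
   [1, 0, 1, 1, 1, 1, 1], [1, 1, 1, 0, 0, 0, 0], [1, 1, 1, 1, 1, 1, 1],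
   [1, 1, 1, 1, 0, 1, 1]]

-- compare_lists: the early-return-False loop is 'no index i fails the test'; pyGetD is exact here
-- under Pre_solution (Python evaluates B[i] only when A[i]==1, excluded by Pre_ for i ≥ 7).
def compareLists (A B : List Int) : Bool :=
  (PySem.List.pyRange 0 (A.length) 1).all
    (fun i => !(PySem.List.pyGetD A i 0 == 1 && PySem.List.pyGetD B i 0 == 0))

def solution (Parameter : List (List Int)) : List (List Int) :=
  let result0 : List (List Int) := [[], [], [], []]
  let result := (PySem.List.enumerate Parameter 0).foldl (fun res ip =>
      (PySem.List.pyRange 0 (timesA.length) 1).foldl (fun res i =>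
        if compareLists ip.2 (PySem.List.pyGetD timesA i []) then
          PySem.List.pySetD res ip.1 (PySem.List.pyGetD res ip.1 [] ++ [i])
        else res) res) result0
  let answer := (PySem.List.pyGetD result 0 []).foldl (fun acc i =>
    (PySem.List.pyGetD result 1 []).foldl (fun acc j =>
      (PySem.List.pyGetD result 2 []).foldl (fun acc k =>
        (PySem.List.pyGetD result 3 []).foldl (fun acc l =>
          if i * 10 + j ≤ 23 ∧ k * 10 + l ≤ 59 then acc ++ [[i, j, k, l]] else acc)
        acc) acc) acc) []
  PySem.List.sorted answer (fun x => x) false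

-- ===== PORT B =====
def patternsB : List (List Int) :=
  [[1, 1, 1, 1, 1, 1, 0], [0, 1, 1, 0, 0, 0, 0], [1, 1, 0, 1, 1, 0, 1],
   [1, 1, 1, 1, 0, 0, 1], [0, 1, 1, 0, 0, 1, 1], [1, 0, 1, 1, 0, 1, 1],
   [1, 0, 1, 1, 1, 1, 1], [1, 1, 1, 0, 0, 0, 0], [1, 1, 1, 1, 1, 1, 1],
   [1, 1, 1, 1, 0, 1, 1]]

def fitsB (para : List Int) (digit : Int) : Bool :=
  (para.zip (PySem.List.pyGetD patternsB digit [])).all (fun ps => ps.1 != 1 || ps.2 == 1)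

def solution_alt (Parameter : List (List Int)) : List (List Int) :=
  if Parameter.length < 4 then []
  else
    (PySem.List.pyRange 0 24 1).foldl (fun answer hour =>
      (PySem.List.pyRange 0 60 1).foldl (fun answer minute =>
        let digits : List Int := [PySem.Int.floordiv hour 10, PySem.Int.mod hour 10,
                                  PySem.Int.floordiv minute 10, PySem.Int.mod minute 10]
        if (PySem.List.pyRange 0 4 1).all (fun pos =>
              fitsB (PySem.List.pyGetD Parameter pos []) (PySem.List.pyGetD digits pos 0))
        then answer ++ [digits] else answer) answer) []

-- ===== PRECONDITION & SPEC =====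
-- Pre_ excludes exactly the inputs where A raises IndexError: more than four entries
-- (result[index] with index ≥ 4), or an entry with the value 1 at a position ≥ 7
-- (compare_lists then reads times[d][i] out of range).
def Pre_solution (Parameter : List (List Int)) : Prop :=
  Parameter.length ≤ 4 ∧ ∀ p ∈ Parameter, ∀ x ∈ p.drop 7, x ≠ 1
instance (Parameter : List (List Int)) : Decidable (Pre_solution Parameter) := by
  unfold Pre_solution; infer_instance

def pvWitness_solution : List (List Int) := [[0, 1], [1], [0, 0, 1], [1, 1]]

def Spec_solution (Parameter : List (List Int)) (out : List (List Int)) : Prop :=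
  out = solution_alt Parameter
instance (Parameter : List (List Int)) (out : List (List Int)) : Decidable (Spec_solution Parameter out) := by
  unfold Spec_solution; infer_instance

-- ===== CLAIM (what is proved, stated in full; the proofs are below) =====
def Claim_equal_solution : Prop := ∀ (Parameter : List (List Int)), Dom_solution Parameter →
  Pre_solution Parameter → Spec_solution Parameter (solution Parameter)

-- ===== LEMMAS AND PROOFS =====

-- hour/minute digit decomposition
def fd (x : Int) : Int := PySem.Int.floordiv x 10
def md (x : Int) : Int := PySem.Int.mod x 10

-- the common canonical form both ports are reduced to
def canon (F0 F1 F2 F3 : Int → Bool) : List (List Int) :=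
  (PySem.List.pyRange 0 24 1).flatMap (fun h =>
    (PySem.List.pyRange 0 60 1).flatMap (fun m =>
      if F0 (fd h) && (F1 (md h) && (F2 (fd m) && F3 (md m)))
      then [[fd h, md h, fd m, md m]] else []))

-- A's quadruple product loop, as in the port
def prodAns (c0 c1 c2 c3 : List Int) : List (List Int) :=
  c0.foldl (fun acc i =>
    c1.foldl (fun acc j =>
      c2.foldl (fun acc k =>
        c3.foldl (fun acc l =>
          if i * 10 + j ≤ 23 ∧ k * 10 + l ≤ 59 then acc ++ [[i, j, k, l]] else acc)
        acc) acc) acc) []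

-- A's candidate list for one position
def cand (p : List Int) : List Int :=
  (PySem.List.pyRange 0 (timesA.length) 1).filter
    (fun i => compareLists p (PySem.List.pyGetD timesA i []))

lemma flatMap_congr' {α β : Type} {xs : List α} {f g : α → List β}
    (h : ∀ x ∈ xs, f x = g x) : xs.flatMap f = xs.flatMap g := by
  induction xs with
  | nil => rfl
  | cons a as ih =>
    simp only [List.flatMap_cons, h a (List.mem_cons_self),
      ih (fun x hx => h x (List.mem_cons_of_mem a hx))]

lemma flatMap_empty {α β : Type} (xs : List α) : xs.flatMap (fun _ => ([] : List β)) = [] := by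
  induction xs with
  | nil => rfl
  | cons a as ih => simp [ih]

lemma flatMap_filter {α β : Type} (p : α → Bool) (xs : List α) (f : α → List β) :
    (xs.filter p).flatMap f = xs.flatMap (fun x => if p x then f x else []) := by
  induction xs with
  | nil => rfl
  | cons a as ih => by_cases h : p a <;> simp [h, ih]

lemma map_filter_flatMap {α β : Type} (p : α → Bool) (xs : List α) (f : α → β) :
    (xs.filter p).map f = xs.flatMap (fun x => if p x then [f x] else []) := by
  induction xs with
  | nil => rfl
  | cons a as ih => by_cases h : p a <;> simp [h, ih]

lemma innerFold0 (C : Int → Bool) (ds : List Int) (a b c d : List Int) :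
    ds.foldl (fun r i => if C i then PySem.List.pySetD r 0 (PySem.List.pyGetD r 0 [] ++ [i]) else r) [a, b, c, d]
      = [a ++ ds.filter C, b, c, d] := by
  induction ds generalizing a with
  | nil => simp
  | cons x ds ih =>
    by_cases h : C x
    · rw [List.foldl_cons]
      simp only [h, if_pos]
      rw [show PySem.List.pySetD [a,b,c,d] 0 (PySem.List.pyGetD [a,b,c,d] 0 [] ++ [x]) = [a ++ [x], b, c, d] from rfl]
      rw [ih]
      simp [h]
    · rw [List.foldl_cons]
      simp only [h, if_neg, Bool.false_eq_true, not_false_iff]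
      rw [ih]
      simp [h]

lemma innerFold1 (C : Int → Bool) (ds : List Int) (a b c d : List Int) :
    ds.foldl (fun r i => if C i then PySem.List.pySetD r 1 (PySem.List.pyGetD r 1 [] ++ [i]) else r) [a, b, c, d]
      = [a, b ++ ds.filter C, c, d] := by
  induction ds generalizing b with
  | nil => simp
  | cons x ds ih =>
    by_cases h : C x
    · rw [List.foldl_cons]
      simp only [h, if_pos]
      rw [show PySem.List.pySetD [a,b,c,d] 1 (PySem.List.pyGetD [a,b,c,d] 1 [] ++ [x]) = [a, b ++ [x], c, d] from rfl]
      rw [ih]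
      simp [h]
    · rw [List.foldl_cons]
      simp only [h, if_neg, Bool.false_eq_true, not_false_iff]
      rw [ih]
      simp [h]

lemma innerFold2 (C : Int → Bool) (ds : List Int) (a b c d : List Int) :
    ds.foldl (fun r i => if C i then PySem.List.pySetD r 2 (PySem.List.pyGetD r 2 [] ++ [i]) else r) [a, b, c, d]
      = [a, b, c ++ ds.filter C, d] := by
  induction ds generalizing c with
  | nil => simp
  | cons x ds ih =>
    by_cases h : C x
    · rw [List.foldl_cons]
      simp only [h, if_pos]
      rw [show PySem.List.pySetD [a,b,c,d] 2 (PySem.List.pyGetD [a,b,c,d] 2 [] ++ [x]) = [a, b, c ++ [x], d] from rfl]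
      rw [ih]
      simp [h]
    · rw [List.foldl_cons]
      simp only [h, if_neg, Bool.false_eq_true, not_false_iff]
      rw [ih]
      simp [h]

lemma innerFold3 (C : Int → Bool) (ds : List Int) (a b c d : List Int) :
    ds.foldl (fun r i => if C i then PySem.List.pySetD r 3 (PySem.List.pyGetD r 3 [] ++ [i]) else r) [a, b, c, d]
      = [a, b, c, d ++ ds.filter C] := by
  induction ds generalizing d with
  | nil => simp
  | cons x ds ih =>
    by_cases h : C x
    · rw [List.foldl_cons]
      simp only [h, if_pos]
      rw [show PySem.List.pySetD [a,b,c,d] 3 (PySem.List.pyGetD [a,b,c,d] 3 [] ++ [x]) = [a, b, c, d ++ [x]] from rfl]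
      rw [ih]
      simp [h]
    · rw [List.foldl_cons]
      simp only [h, if_neg, Bool.false_eq_true, not_false_iff]
      rw [ih]
      simp [h]

-- compare_lists equals the zip test when the parameter has no lit segment beyond index 6
lemma cmp_eq_zip (p pat : List Int) (h7 : pat.length = 7)
    (hbit : ∀ x ∈ pat, x = 0 ∨ x = 1)
    (hp : ∀ x ∈ p.drop 7, x ≠ 1) :
    compareLists p pat = (p.zip pat).all (fun ps => ps.1 != 1 || ps.2 == 1) := by
  rw [Bool.eq_iff_iff]
  simp only [compareLists, List.all_eq_true, PySem.List.mem_pyRange_one]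
  constructor
  · intro H ps hps
    obtain ⟨n, hn, hget⟩ := List.mem_iff_getElem.mp hps
    rw [List.length_zip] at hn
    have hnp : n < p.length := lt_of_lt_of_le hn (min_le_left _ _)
    have hnq : n < pat.length := lt_of_lt_of_le hn (min_le_right _ _)
    have := H (n : Int) ⟨by positivity, by exact_mod_cast hnp⟩
    rw [PySem.List.pyGetD_natCast, PySem.List.pyGetD_natCast] at this
    rw [← hget, List.getElem_zip]
    simp only [List.getD_eq_getElem _ _ hnp, List.getD_eq_getElem _ _ hnq] at this
    have hb := hbit _ (List.getElem_mem hnq)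
    simp only [Bool.not_eq_true', Bool.and_eq_false_iff, beq_eq_false_iff_ne, ne_eq] at this
    simp only [bne_iff_ne, beq_iff_eq, Bool.or_eq_true, ne_eq]
    rcases this with h | h
    · left; exact h
    · right; omega
  · intro H i hi
    obtain ⟨h0, hlen⟩ := hi
    obtain ⟨n, rfl⟩ := Int.eq_ofNat_of_zero_le h0
    have hnp : n < p.length := by exact_mod_cast hlen
    rw [PySem.List.pyGetD_natCast, PySem.List.pyGetD_natCast]
    by_cases hn7 : n < 7
    · have hnq : n < pat.length := by omega
      have hmem : (p[n], pat[n]'hnq) ∈ p.zip pat := by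
        rw [← List.getElem_zip (i := n)]
        · exact List.getElem_mem _
        · rw [List.length_zip]; omega
      have := H _ hmem
      simp only [List.getD_eq_getElem _ _ hnp, List.getD_eq_getElem _ _ hnq]
      simp only [bne_iff_ne, beq_iff_eq, Bool.or_eq_true] at this
      simp only [Bool.not_eq_true', Bool.and_eq_false_iff, beq_eq_false_iff_ne, ne_eq]
      rcases this with h | h
      · left; exact h
      · right; omega
    · have hmem : p[n] ∈ p.drop 7 := by
        rw [List.mem_iff_getElem]
        refine ⟨n - 7, by rw [List.length_drop]; omega, ?_⟩
        rw [List.getElem_drop]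
        congr 1; omega
      have hne : p[n] ≠ 1 := hp _ hmem
      simp only [List.getD_eq_getElem _ _ hnp]
      simp [hne]

lemma F_eq (p : List Int) (hp : ∀ x ∈ p.drop 7, x ≠ 1) (d : Int)
    (hd0 : 0 ≤ d) (hd1 : d < 10) :
    compareLists p (PySem.List.pyGetD timesA d []) = fitsB p d := by
  interval_cases d <;>
    (simp only [fitsB]; exact cmp_eq_zip p _ (by decide) (by decide) hp)

lemma prodAns_nil3 (c0 c1 c2 : List Int) : prodAns c0 c1 c2 [] = [] := by
  unfold prodAns
  simp only [List.foldl_nil, List.foldl_fixed]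

lemma split24 {α : Type} (g : Int → Int → List α) :
    (PySem.List.pyRange 0 10 1).flatMap (fun i => (PySem.List.pyRange 0 10 1).flatMap (fun j =>
      if i * 10 + j ≤ 23 then g i j else []))
    = (PySem.List.pyRange 0 24 1).flatMap (fun h => g (fd h) (md h)) := by
  have e10 : PySem.List.pyRange 0 10 1 = [0,1,2,3,4,5,6,7,8,9] := by decide
  have e24 : (PySem.List.pyRange 0 24 1).map (fun h => (fd h, md h)) =
      [(0,0),(0,1),(0,2),(0,3),(0,4),(0,5),(0,6),(0,7),(0,8),(0,9),
       (1,0),(1,1),(1,2),(1,3),(1,4),(1,5),(1,6),(1,7),(1,8),(1,9),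
       (2,0),(2,1),(2,2),(2,3)] := by decide
  have hm : (PySem.List.pyRange 0 24 1).flatMap (fun h => g (fd h) (md h)) =
      ((PySem.List.pyRange 0 24 1).map (fun h => (fd h, md h))).flatMap (fun p => g p.1 p.2) := by
    rw [List.flatMap_map]
  rw [hm, e24, e10]
  norm_num [List.flatMap_cons]

lemma split60 {α : Type} (g : Int → Int → List α) :
    (PySem.List.pyRange 0 10 1).flatMap (fun k => (PySem.List.pyRange 0 10 1).flatMap (fun l =>
      if k * 10 + l ≤ 59 then g k l else []))
    = (PySem.List.pyRange 0 60 1).flatMap (fun m => g (fd m) (md m)) := by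
  have e10 : PySem.List.pyRange 0 10 1 = [0,1,2,3,4,5,6,7,8,9] := by decide
  have e60 : (PySem.List.pyRange 0 60 1).map (fun m => (fd m, md m)) =
      [(0,0),(0,1),(0,2),(0,3),(0,4),(0,5),(0,6),(0,7),(0,8),(0,9),(1,0),(1,1),(1,2),(1,3),(1,4),(1,5),(1,6),(1,7),(1,8),(1,9),(2,0),(2,1),(2,2),(2,3),(2,4),(2,5),(2,6),(2,7),(2,8),(2,9),(3,0),(3,1),(3,2),(3,3),(3,4),(3,5),(3,6),(3,7),(3,8),(3,9),(4,0),(4,1),(4,2),(4,3),(4,4),(4,5),(4,6),(4,7),(4,8),(4,9),(5,0),(5,1),(5,2),(5,3),(5,4),(5,5),(5,6),(5,7),(5,8),(5,9)] := by decide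
  have hm : (PySem.List.pyRange 0 60 1).flatMap (fun m => g (fd m) (md m)) =
      ((PySem.List.pyRange 0 60 1).map (fun m => (fd m, md m))).flatMap (fun p => g p.1 p.2) := by
    rw [List.flatMap_map]
  rw [hm, e60, e10]
  norm_num [List.flatMap_cons]

lemma fd_nonneg (x : Int) (hx : 0 ≤ x) : 0 ≤ fd x := by
  unfold fd
  rw [PySem.Int.le_floordiv_iff_mul_le (by norm_num)]
  omega

lemma fd_lt (x : Int) (hx : x < 100) : fd x < 10 := by
  unfold fd
  rw [PySem.Int.floordiv_lt_iff_lt_mul (by norm_num)]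
  omega

lemma md_nonneg (x : Int) : 0 ≤ md x := PySem.Int.mod_nonneg x (by norm_num)

lemma md_lt (x : Int) : md x < 10 := PySem.Int.mod_lt x (by norm_num)

lemma fdmd_lt {a b : Int} (h : a < b) :
    fd a < fd b ∨ (fd a = fd b ∧ md a < md b) := by
  have ha := PySem.Int.floordiv_mul_add_mod a 10
  have hb := PySem.Int.floordiv_mul_add_mod b 10
  have h1 := md_nonneg a
  have h2 := md_lt a
  have h3 := md_nonneg b
  have h4 := md_lt b
  unfold fd md at *
  omega

lemma quad_lt_right (A B a b : Int) (h : a < b) :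
    ([A, B, fd a, md a] : List Int) < [A, B, fd b, md b] := by
  refine List.Lex.cons (List.Lex.cons ?_)
  rcases fdmd_lt h with h1 | ⟨h1, h2⟩
  · exact List.Lex.rel h1
  · rw [h1]; exact List.Lex.cons (List.Lex.rel h2)

lemma quad_lt_left {a b : Int} (h : a < b) (c d e f : Int) :
    ([fd a, md a, c, d] : List Int) < [fd b, md b, e, f] := by
  rcases fdmd_lt h with h1 | ⟨h1, h2⟩
  · exact List.Lex.rel h1
  · rw [h1]; exact List.Lex.cons (List.Lex.rel h2)

lemma canon_pairwise (F0 F1 F2 F3 : Int → Bool) :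
    (canon F0 F1 F2 F3).Pairwise (fun a b => a ≤ b) := by
  unfold canon
  rw [List.pairwise_flatMap]
  constructor
  · intro h _
    rw [List.pairwise_flatMap]
    constructor
    · intro m _
      split_ifs <;> simp
    · refine (PySem.List.pairwise_lt_pyRange_one 0 60).imp ?_
      intro m m' hlt x hx y hy
      have hx' : x = [fd h, md h, fd m, md m] := by
        by_cases hc : (F0 (fd h) && (F1 (md h) && (F2 (fd m) && F3 (md m)))) = true <;>
          simp [hc] at hx
        exact hx
      have hy' : y = [fd h, md h, fd m', md m'] := by
        by_cases hc : (F0 (fd h) && (F1 (md h) && (F2 (fd m') && F3 (md m')))) = true <;>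
          simp [hc] at hy
        exact hy
      rw [hx', hy']
      exact le_of_lt (quad_lt_right _ _ _ _ hlt)
  · refine (PySem.List.pairwise_lt_pyRange_one 0 24).imp ?_
    intro h h' hlt x hx y hy
    simp only [List.mem_flatMap] at hx hy
    obtain ⟨m, _, hx⟩ := hx
    obtain ⟨m', _, hy⟩ := hy
    have hx' : x = [fd h, md h, fd m, md m] := by
      by_cases hc : (F0 (fd h) && (F1 (md h) && (F2 (fd m) && F3 (md m)))) = true <;>
        simp [hc] at hx
      exact hx
    have hy' : y = [fd h', md h', fd m', md m'] := by
      by_cases hc : (F0 (fd h') && (F1 (md h') && (F2 (fd m') && F3 (md m')))) = true <;>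
        simp [hc] at hy
      exact hy
    rw [hx', hy']
    exact le_of_lt (quad_lt_left hlt _ _ _ _)

lemma canon_congr (F0 F1 F2 F3 G0 G1 G2 G3 : Int → Bool)
    (h0 : ∀ d, 0 ≤ d → d < 10 → F0 d = G0 d) (h1 : ∀ d, 0 ≤ d → d < 10 → F1 d = G1 d)
    (h2 : ∀ d, 0 ≤ d → d < 10 → F2 d = G2 d) (h3 : ∀ d, 0 ≤ d → d < 10 → F3 d = G3 d) :
    canon F0 F1 F2 F3 = canon G0 G1 G2 G3 := by
  unfold canon
  refine flatMap_congr' (fun h hh => ?_)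
  rw [PySem.List.mem_pyRange_one] at hh
  refine flatMap_congr' (fun m hm => ?_)
  rw [PySem.List.mem_pyRange_one] at hm
  rw [h0 _ (fd_nonneg _ hh.1) (fd_lt _ (by omega)),
      h1 _ (md_nonneg _) (md_lt _),
      h2 _ (fd_nonneg _ hm.1) (fd_lt _ (by omega)),
      h3 _ (md_nonneg _) (md_lt _)]

lemma prodAns_eq (c0 c1 c2 c3 : List Int) :
    prodAns c0 c1 c2 c3
      = c0.flatMap (fun i => c1.flatMap (fun j => c2.flatMap (fun k =>
          (c3.filter (fun l => decide (i * 10 + j ≤ 23 ∧ k * 10 + l ≤ 59))).map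
            (fun l => [i, j, k, l])))) := by
  unfold prodAns
  simp only [PySem.List.foldl_append_ite, PySem.List.foldl_append_eq_flatMap, List.nil_append]

lemma prod_eq_canon (F0 F1 F2 F3 : Int → Bool) :
    prodAns ((PySem.List.pyRange 0 10 1).filter F0) ((PySem.List.pyRange 0 10 1).filter F1)
            ((PySem.List.pyRange 0 10 1).filter F2) ((PySem.List.pyRange 0 10 1).filter F3)
      = canon F0 F1 F2 F3 := by
  rw [prodAns_eq]
  simp only [flatMap_filter, List.filter_filter, map_filter_flatMap]
  have step : (PySem.List.pyRange 0 10 1).flatMap (fun i =>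
      if F0 i then (PySem.List.pyRange 0 10 1).flatMap (fun j =>
        if F1 j then (PySem.List.pyRange 0 10 1).flatMap (fun k =>
          if F2 k then (PySem.List.pyRange 0 10 1).flatMap (fun l =>
            if decide (i * 10 + j ≤ 23 ∧ k * 10 + l ≤ 59) && F3 l
            then [[i, j, k, l]] else []) else []) else []) else [])
      = (PySem.List.pyRange 0 10 1).flatMap (fun i =>
          (PySem.List.pyRange 0 10 1).flatMap (fun j =>
            if i * 10 + j ≤ 23 then
              (PySem.List.pyRange 0 10 1).flatMap (fun k =>
                (PySem.List.pyRange 0 10 1).flatMap (fun l =>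
                  if k * 10 + l ≤ 59 then
                    (if F0 i && (F1 j && (F2 k && F3 l)) then [[i, j, k, l]] else [])
                  else [])) else [])) := by
    refine flatMap_congr' (fun i _ => ?_)
    by_cases hF0 : F0 i = true
    · rw [if_pos hF0]
      refine flatMap_congr' (fun j _ => ?_)
      by_cases hg : i * 10 + j ≤ 23
      · rw [if_pos hg]
        by_cases hF1 : F1 j = true
        · rw [if_pos hF1]
          refine flatMap_congr' (fun k _ => ?_)
          by_cases hF2 : F2 k = true
          · rw [if_pos hF2]
            refine flatMap_congr' (fun l _ => ?_)
            by_cases hmg : k * 10 + l ≤ 59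
            · simp [hg, hmg, hF0, hF1, hF2]
            · simp [hmg]
          · rw [if_neg hF2]
            simp [hF2, flatMap_empty]
        · rw [if_neg hF1]
          simp [hF1, flatMap_empty]
      · rw [if_neg hg]
        simp [hg, flatMap_empty]
    · rw [if_neg hF0]
      simp [hF0, flatMap_empty]
  rw [step, split24]
  unfold canon
  exact flatMap_congr' (fun h _ => split60 _)

lemma alt_eq_canon (p0 p1 p2 p3 : List Int) :
    solution_alt [p0, p1, p2, p3] = canon (fitsB p0) (fitsB p1) (fitsB p2) (fitsB p3) := by
  unfold solution_alt
  rw [if_neg (by norm_num)]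
  simp only [PySem.List.foldl_append_if, PySem.List.foldl_append_eq_flatMap, List.nil_append,
    map_filter_flatMap]
  unfold canon
  refine flatMap_congr' (fun h _ => ?_)
  refine flatMap_congr' (fun m _ => ?_)
  have e4 : PySem.List.pyRange 0 4 1 = [0, 1, 2, 3] := by decide
  rw [e4]
  simp only [List.all_cons, List.all_nil, Bool.and_true]
  rfl

lemma sol1 (p0 : List Int) :
    solution [p0] = PySem.List.sorted (prodAns (cand p0) [] [] []) (fun x => x) false := by
  unfold solution
  simp only [PySem.List.enumerate_cons, PySem.List.enumerate_nil, List.foldl_cons, List.foldl_nil]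
  rw [innerFold0]
  simp only [List.nil_append]
  rfl

lemma sol2 (p0 p1 : List Int) :
    solution [p0, p1] = PySem.List.sorted (prodAns (cand p0) (cand p1) [] []) (fun x => x) false := by
  unfold solution
  simp only [PySem.List.enumerate_cons, PySem.List.enumerate_nil, List.foldl_cons, List.foldl_nil,
    zero_add]
  rw [innerFold0, innerFold1]
  simp only [List.nil_append]
  rfl

lemma sol3 (p0 p1 p2 : List Int) :
    solution [p0, p1, p2]
      = PySem.List.sorted (prodAns (cand p0) (cand p1) (cand p2) []) (fun x => x) false := by
  unfold solution
  simp only [PySem.List.enumerate_cons, PySem.List.enumerate_nil, List.foldl_cons, List.foldl_nil,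
    zero_add]
  norm_num
  rw [innerFold0, innerFold1, innerFold2]
  simp only [List.nil_append]
  rfl

lemma sol4 (p0 p1 p2 p3 : List Int) :
    solution [p0, p1, p2, p3]
      = PySem.List.sorted (prodAns (cand p0) (cand p1) (cand p2) (cand p3)) (fun x => x) false := by
  unfold solution
  simp only [PySem.List.enumerate_cons, PySem.List.enumerate_nil, List.foldl_cons, List.foldl_nil,
    zero_add]
  norm_num
  rw [innerFold0, innerFold1, innerFold2, innerFold3]
  simp only [List.nil_append]
  rfl

lemma hcand (p : List Int) :
    cand p = (PySem.List.pyRange 0 10 1).filter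
      (fun i => compareLists p (PySem.List.pyGetD timesA i [])) := rfl

-- the port's sorted call elaborates with core's List LT instance; bridge to Mathlib's
-- LinearOrder instance (same lexicographic order) so the PySem order lemmas apply
lemma sorted_bridge (xs : List (List Int)) :
    PySem.List.sorted xs (fun x => x) false
      = @PySem.List.sorted _ _ List.instLinearOrder.toLT LinearOrder.toDecidableLT xs (fun x => x) false := by
  rw [PySem.List.sorted_eq_foldl_insertBy]
  congr 1
  funext acc x
  congr 1
  funext a b
  refine decide_eq_decide.mpr ?_
  exact List.lt_iff_lex_lt a b

-- ===== VERDICT (by name: the statement is the Claim_ definition above) =====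
theorem solution_spec : Claim_equal_solution := by
  unfold Claim_equal_solution
  intro P _hdom hpre
  unfold Spec_solution
  obtain hlen := hpre.1
  obtain hdrop := hpre.2
  rcases P with _ | ⟨p0, _ | ⟨p1, _ | ⟨p2, _ | ⟨p3, _ | ⟨p4, rest⟩⟩⟩⟩⟩
  · rfl
  · rw [sol1, prodAns_nil3]
    rfl
  · rw [sol2, prodAns_nil3]
    rfl
  · rw [sol3, prodAns_nil3]
    rfl
  · have hd0 : ∀ x ∈ p0.drop 7, x ≠ 1 := hdrop p0 (by simp)
    have hd1 : ∀ x ∈ p1.drop 7, x ≠ 1 := hdrop p1 (by simp)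
    have hd2 : ∀ x ∈ p2.drop 7, x ≠ 1 := hdrop p2 (by simp)
    have hd3 : ∀ x ∈ p3.drop 7, x ≠ 1 := hdrop p3 (by simp)
    rw [sol4, hcand, hcand, hcand, hcand, prod_eq_canon,
      canon_congr _ _ _ _ (fitsB p0) (fitsB p1) (fitsB p2) (fitsB p3)
        (fun d h1 h2 => F_eq p0 hd0 d h1 h2) (fun d h1 h2 => F_eq p1 hd1 d h1 h2)
        (fun d h1 h2 => F_eq p2 hd2 d h1 h2) (fun d h1 h2 => F_eq p3 hd3 d h1 h2),
      alt_eq_canon, sorted_bridge]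
    exact PySem.List.sorted_eq_self_of_pairwise _ _ (canon_pairwise _ _ _ _)
  · exfalso
    simp [List.length] at hlen
    omega
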